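-- pv_equiv track=rewrite | github.com/menybenatar/algorithms_tirgulim | tirgul 7/main.py | gemedynyulia
-- ===== SOURCE A (Python) =====
-- def gemedynyulia(a,n):
--     c = [['-1' for j in range(n)] for i in range(n)]
--     for i in range(n):
--         c[i][i] =a[i]
--
--     for i in range(n-2,-1,-1):
--         for j in range(i+1,n):
--             c[i][j] = max(a[i]-c[i+1][j],a[j]-c[i][j-1])
--     return c[0][n-1]
-- ===== SOURCE B (Python) =====
-- def gemedynyulia(a, n):
--     # top-down: recurse on sub-intervals [i, j] on demand, caching results in a dict
--     memo = {}
--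
--     def solve(i, j):
--         if (i, j) in memo:
--             return memo[(i, j)]
--         if i == j:
--             v = a[i]
--         else:
--             v = max(a[i] - solve(i + 1, j), a[j] - solve(i, j - 1))
--         memo[(i, j)] = v
--         return v
--
--     return solve(0, n - 1)
-- ===== Notes on version B (the rewrite author's own statement) =====
-- stated objective: alternative
-- what changed: B replaces A's bottom-up fill of a sentinel-initialized n-by-n table (two nested index loops over rows and columns) by a top-down memoized recursion over sub-intervals [i,j], demand-computing entries into a dict keyed by (i,j) and never pre-building a table.
import Mathlib
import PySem

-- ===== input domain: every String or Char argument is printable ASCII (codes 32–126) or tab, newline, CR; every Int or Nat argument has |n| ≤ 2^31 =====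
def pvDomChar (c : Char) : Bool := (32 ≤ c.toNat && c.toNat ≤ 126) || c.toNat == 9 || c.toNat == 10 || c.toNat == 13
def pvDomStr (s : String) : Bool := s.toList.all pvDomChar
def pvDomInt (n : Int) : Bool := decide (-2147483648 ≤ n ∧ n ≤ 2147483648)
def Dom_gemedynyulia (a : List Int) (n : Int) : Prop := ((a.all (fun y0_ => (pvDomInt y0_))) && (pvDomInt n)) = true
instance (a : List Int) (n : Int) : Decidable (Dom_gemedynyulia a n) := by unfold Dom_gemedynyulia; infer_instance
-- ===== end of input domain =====

-- B replaces A's bottom-up n×n table fill by top-down recursion over sub-intervals with a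
-- memo dict, computing only the reachable cells (same return value on every input Pre_ admits).

-- ===== PORT A =====
-- c[i][j] read (Python indexing) and c[i][j] = v item assignment on the list-of-lists table
def pvGet2 (c : List (List Int)) (i j : Int) : Int :=
  PySem.List.pyGetD (PySem.List.pyGetD c i []) j 0
def pvSet2 (c : List (List Int)) (i j : Int) (v : Int) : List (List Int) :=
  PySem.List.pySetD c i (PySem.List.pySetD (PySem.List.pyGetD c i []) j v)

-- Python fills the fresh table with the STRING '-1'; under Pre_ those placeholder cells are
-- never read back, so the Int placeholder -1 stands in for them.
def gemedynyulia (a : List Int) (n : Int) : Int :=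
  let c0 := (PySem.List.pyRange 0 n 1).map
      (fun _i => (PySem.List.pyRange 0 n 1).map (fun _j => (-1 : Int)))
  let c1 := (PySem.List.pyRange 0 n 1).foldl
      (fun c i => pvSet2 c i i (PySem.List.pyGetD a i 0)) c0
  let c2 := (PySem.List.pyRange (n-2) (-1) (-1)).foldl (fun c i =>
      (PySem.List.pyRange (i+1) n 1).foldl (fun c j =>
        pvSet2 c i j (max (PySem.List.pyGetD a i 0 - pvGet2 c (i+1) j)
                          (PySem.List.pyGetD a j 0 - pvGet2 c i (j-1)))) c) c1
  pvGet2 c2 0 (n-1)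

-- ===== PORT B =====
-- Source B's solve(i, j): memo lookup, base case i == j, else the two recursive calls threading
-- the memo dict; in Lean the mutable dict becomes explicit state (value, memo).  Source B's
-- 'if i == j' base is reached exactly when ¬ i < j on the calls that occur (i ≤ j always),
-- written '¬ i < j' here so Lean's termination measure (j - i).toNat works.
def pvSolveMemo (a : List Int) (i j : Int) (m : PySem.Dict (Int × Int) Int) :
    Int × PySem.Dict (Int × Int) Int :=
  match m.get? (i, j) with
  | some v => (v, m)
  | none =>
    if _h : i < j then
      let r1 := pvSolveMemo a (i+1) j m
      let r2 := pvSolveMemo a i (j-1) r1.2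
      let v := max (PySem.List.pyGetD a i 0 - r1.1) (PySem.List.pyGetD a j 0 - r2.1)
      (v, r2.2.insert (i, j) v)
    else
      let v := PySem.List.pyGetD a i 0
      (v, m.insert (i, j) v)
termination_by (j - i).toNat
decreasing_by all_goals omega

def gemedynyulia_alt (a : List Int) (n : Int) : Int :=
  (pvSolveMemo a 0 (n - 1) PySem.Dict.empty).1

-- ===== PRECONDITION & SPEC =====
-- Pre_ is exactly where the Python A returns: for n < 1 the final read c[0][n-1] hits the
-- empty/too-short table (IndexError), for n > len(a) the diagonal fill reads a[i] out of
-- range (IndexError).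
def Pre_gemedynyulia (a : List Int) (n : Int) : Prop := 1 ≤ n ∧ n ≤ (a.length : Int)
instance (a : List Int) (n : Int) : Decidable (Pre_gemedynyulia a n) := by
  unfold Pre_gemedynyulia; infer_instance
def pvWitness_gemedynyulia : List Int × Int := ([3, 1, 5], 3)

def Spec_gemedynyulia (a : List Int) (n : Int) (out : Int) : Prop := out = gemedynyulia_alt a n
instance (a : List Int) (n : Int) (out : Int) : Decidable (Spec_gemedynyulia a n out) := by
  unfold Spec_gemedynyulia; infer_instance

-- ===== CLAIM (what is proved, stated in full; the proofs are below) =====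
def Claim_equal_gemedynyulia : Prop := ∀ (a : List Int) (n : Int), Dom_gemedynyulia a n →
  Pre_gemedynyulia a n → Spec_gemedynyulia a n (gemedynyulia a n)

-- ===== LEMMAS AND PROOFS =====

-- reference value of the coin game on the interval [i, j]
def pvSolve (a : List Int) (i j : Int) : Int :=
  if i < j then
    max (PySem.List.pyGetD a i 0 - pvSolve a (i+1) j)
        (PySem.List.pyGetD a j 0 - pvSolve a i (j-1))
  else PySem.List.pyGetD a i 0
termination_by (j - i).toNat
decreasing_by all_goals omega

theorem pvSolve_diag (a : List Int) (i : Int) :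
    pvSolve a i i = PySem.List.pyGetD a i 0 := by
  rw [pvSolve]; simp

theorem pvSolve_lt (a : List Int) {i j : Int} (h : i < j) :
    pvSolve a i j = max (PySem.List.pyGetD a i 0 - pvSolve a (i+1) j)
        (PySem.List.pyGetD a j 0 - pvSolve a i (j-1)) := by
  rw [pvSolve]; simp [h]

-- every value cached in the memo is the game value of its interval
def pvMemoOK (a : List Int) (m : PySem.Dict (Int × Int) Int) : Prop :=
  ∀ p v, m.get? p = some v → v = pvSolve a p.1 p.2

theorem pvMemo_correct (a : List Int) : ∀ (k : Nat) (i j : Int)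
    (m : PySem.Dict (Int × Int) Int), (j - i).toNat ≤ k → pvMemoOK a m →
    (pvSolveMemo a i j m).1 = pvSolve a i j ∧ pvMemoOK a (pvSolveMemo a i j m).2 := by
  intro k
  induction k with
  | zero =>
    intro i j m hk hOK
    rw [pvSolveMemo]
    cases hget : m.get? (i, j) with
    | some v => exact ⟨hOK _ v hget, hOK⟩
    | none =>
      have hij : ¬ i < j := by omega
      simp only [hij, dif_neg, not_false_iff]
      refine ⟨by rw [pvSolve]; simp [hij], ?_⟩
      intro p v hpv
      rw [PySem.Dict.get?_insert] at hpv
      split at hpv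
      · rename_i hp; subst hp
        cases hpv; rw [pvSolve]; simp [hij]
      · exact hOK _ _ hpv
  | succ k ih =>
    intro i j m hk hOK
    rw [pvSolveMemo]
    cases hget : m.get? (i, j) with
    | some v => exact ⟨hOK _ v hget, hOK⟩
    | none =>
      by_cases hij : i < j
      · simp only [hij, dif_pos]
        obtain ⟨h1v, h1m⟩ := ih (i+1) j m (by omega) hOK
        obtain ⟨h2v, h2m⟩ := ih i (j-1) (pvSolveMemo a (i+1) j m).2 (by omega) h1m
        rw [h1v, h2v]
        refine ⟨(pvSolve_lt a hij).symm, ?_⟩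
        intro p v hpv
        rw [PySem.Dict.get?_insert] at hpv
        split at hpv
        · rename_i hp; subst hp
          cases hpv; exact (pvSolve_lt a hij).symm
        · exact h2m _ _ hpv
      · simp only [hij, dif_neg, not_false_iff]
        refine ⟨by rw [pvSolve]; simp [hij], ?_⟩
        intro p v hpv
        rw [PySem.Dict.get?_insert] at hpv
        split at hpv
        · rename_i hp; subst hp
          cases hpv; rw [pvSolve]; simp [hij]
        · exact hOK _ _ hpv

-- well-formed n×n table
def pvWf (n : Int) (c : List (List Int)) : Prop :=
  c.length = n.toNat ∧ ∀ r ∈ c, r.length = n.toNat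

theorem pvGet2_nonneg (c : List (List Int)) (i j : Int) (hi : 0 ≤ i) (hj : 0 ≤ j) :
    pvGet2 c i j = (c.getD i.toNat []).getD j.toNat 0 := by
  unfold pvGet2
  rw [PySem.List.pyGetD_of_nonneg _ _ hi, PySem.List.pyGetD_of_nonneg _ _ hj]

theorem pvSet2_nonneg (c : List (List Int)) (i j : Int) (v : Int) (hi : 0 ≤ i) (hj : 0 ≤ j) :
    pvSet2 c i j v = c.set i.toNat ((c.getD i.toNat []).set j.toNat v) := by
  unfold pvSet2
  rw [PySem.List.pyGetD_of_nonneg _ _ hi, PySem.List.pySetD_of_nonneg _ _ hj,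
    PySem.List.pySetD_of_nonneg _ _ hi]

theorem pvWf_set2 {n : Int} {c : List (List Int)} (hWf : pvWf n c) (i j : Int)
    (hi0 : 0 ≤ i) (hin : i < n) (hj : 0 ≤ j) (v : Int) : pvWf n (pvSet2 c i j v) := by
  obtain ⟨hlen, hrows⟩ := hWf
  rw [pvSet2_nonneg c i j v hi0 hj]
  have hilen : i.toNat < c.length := by omega
  refine ⟨by simpa using hlen, ?_⟩
  intro r hr
  rcases List.mem_or_eq_of_mem_set hr with h | h
  · exact hrows r h
  · subst h
    rw [List.length_set, List.getD_eq_getElem _ _ hilen]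
    exact hrows _ (List.getElem_mem hilen)

theorem pvGet2_set2 {n : Int} {c : List (List Int)} (hWf : pvWf n c)
    {i j i' j' : Int} (v : Int)
    (hi0 : 0 ≤ i) (hin : i < n) (hj0 : 0 ≤ j) (_hjn : j < n)
    (hi0' : 0 ≤ i') (hin' : i' < n) (hj0' : 0 ≤ j') (hjn' : j' < n) :
    pvGet2 (pvSet2 c i j v) i' j' = if i' = i ∧ j' = j then v else pvGet2 c i' j' := by
  obtain ⟨hlen, hrows⟩ := hWf
  have hilen : i.toNat < c.length := by omega
  have hilen' : i'.toNat < c.length := by omega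
  have hrowlen : (c.getD i.toNat []).length = n.toNat := by
    rw [List.getD_eq_getElem _ _ hilen]; exact hrows _ (List.getElem_mem hilen)
  rw [pvSet2_nonneg c i j v hi0 hj0, pvGet2_nonneg _ i' j' hi0' hj0',
    pvGet2_nonneg c i' j' hi0' hj0']
  rw [List.getD_eq_getElem?_getD] at hrowlen
  simp only [List.getD_eq_getElem?_getD, List.getElem?_set]
  by_cases hii : i' = i
  · have e : i.toNat = i'.toNat := by omega
    rw [if_pos e, if_pos hilen]
    simp only [Option.getD_some]
    rw [List.getElem?_set]
    by_cases hjj : j' = j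
    · have e2 : j.toNat = j'.toNat := by omega
      rw [if_pos e2, if_pos (by omega), if_pos ⟨hii, hjj⟩]
      simp
    · have e2 : j.toNat ≠ j'.toNat := by omega
      rw [if_neg e2, if_neg (by tauto)]
      subst hii
      rfl
  · have e : i.toNat ≠ i'.toNat := by omega
    rw [if_neg e, if_neg (by tauto)]

-- the DP invariant: cells of rows below i are final, the diagonal is final, and in row i the
-- cells strictly left of column m are final
def pvTab (a : List Int) (n i m : Int) (c : List (List Int)) : Prop :=
  pvWf n c ∧ ∀ i' j' : Int, 0 ≤ i' → i' < n → i' ≤ j' → j' < n →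
    (i < i' ∨ i' = j' ∨ (i' = i ∧ j' < m)) → pvGet2 c i' j' = pvSolve a i' j'

-- the diagonal loop establishes pvTab a n (n-2) (n-2)
theorem pvDiag (a : List Int) (n : Int) : ∀ (k : Nat) (m : Int) (c : List (List Int)),
    0 ≤ m → m ≤ n → (n - m).toNat = k → pvWf n c →
    (∀ i : Int, 0 ≤ i → i < m → pvGet2 c i i = PySem.List.pyGetD a i 0) →
    (pvWf n ((PySem.List.pyRange m n 1).foldl
        (fun c i => pvSet2 c i i (PySem.List.pyGetD a i 0)) c) ∧
      ∀ i : Int, 0 ≤ i → i < n →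
        pvGet2 ((PySem.List.pyRange m n 1).foldl
          (fun c i => pvSet2 c i i (PySem.List.pyGetD a i 0)) c) i i
          = PySem.List.pyGetD a i 0) := by
  intro k
  induction k with
  | zero =>
    intro m c hm0 hmn hk hWf hdiag
    rw [PySem.List.pyRange_one_eq_nil (by omega)]
    exact ⟨hWf, fun i h0 hn => hdiag i h0 (by omega)⟩
  | succ k ih =>
    intro m c hm0 hmn hk hWf hdiag
    have hmltn : m < n := by omega
    rw [PySem.List.pyRange_one_cons hmltn]
    simp only [List.foldl_cons]
    apply ih (m+1) _ (by omega) (by omega) (by omega)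
    · exact pvWf_set2 hWf m m hm0 hmltn hm0 _
    · intro i h0 hi
      rw [pvGet2_set2 hWf _ hm0 hmltn hm0 hmltn h0 (by omega) h0 (by omega)]
      by_cases him : i = m
      · simp [him]
      · rw [if_neg (by tauto)]; exact hdiag i h0 (by omega)

-- the inner loop of A completes row i
theorem pvInner (a : List Int) (n i : Int) (hi0 : 0 ≤ i) (hin : i < n) :
    ∀ (k : Nat) (m : Int) (c : List (List Int)),
    i + 1 ≤ m → m ≤ n → (n - m).toNat = k → pvTab a n i m c →
    pvTab a n i n ((PySem.List.pyRange m n 1).foldl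
      (fun c j => pvSet2 c i j (max (PySem.List.pyGetD a i 0 - pvGet2 c (i+1) j)
          (PySem.List.pyGetD a j 0 - pvGet2 c i (j-1)))) c) := by
  intro k
  induction k with
  | zero =>
    intro m c hm1 hmn hk hTab
    rw [PySem.List.pyRange_one_eq_nil (by omega)]
    have : m = n := by omega
    subst this; exact hTab
  | succ k ih =>
    intro m c hm1 hmn hk hTab
    have hmltn : m < n := by omega
    rw [PySem.List.pyRange_one_cons hmltn]
    simp only [List.foldl_cons]
    apply ih (m+1) _ (by omega) (by omega) (by omega)
    obtain ⟨hWf, hcell⟩ := hTab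
    -- the value written into c[i][m] is pvSolve a i m
    have hv1 : pvGet2 c (i+1) m = pvSolve a (i+1) m := by
      apply hcell (i+1) m (by omega) (by omega) (by omega) (by omega)
      left; omega
    have hv2 : pvGet2 c i (m-1) = pvSolve a i (m-1) := by
      apply hcell i (m-1) hi0 hin (by omega) (by omega)
      right; right; exact ⟨rfl, by omega⟩
    refine ⟨pvWf_set2 hWf i m hi0 hin (by omega) _, ?_⟩
    intro i' j' h0' hn' hle' hlt' hcase
    rw [pvGet2_set2 hWf _ hi0 hin (by omega) hmltn h0' hn' (by omega) hlt']
    by_cases heq : i' = i ∧ j' = m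
    · rw [if_pos heq, heq.1, heq.2]
      rw [hv1, hv2, pvSolve_lt a (show i < m by omega)]
    · rw [if_neg heq]
      apply hcell i' j' h0' hn' hle' hlt'
      rcases hcase with h | h | ⟨h1, h2⟩
      · left; exact h
      · right; left; exact h
      · have hj : j' ≠ m := fun hj => heq ⟨h1, hj⟩
        right; right; exact ⟨h1, by omega⟩

-- the outer loop of A fills every cell
theorem pvOuter (a : List Int) (n : Int) : ∀ (k : Nat) (p : Int) (c : List (List Int)),
    -1 ≤ p → p ≤ n - 1 → (p + 1).toNat = k → pvTab a n p p c →
    pvTab a n (-1) (-1) ((PySem.List.pyRange p (-1) (-1)).foldl (fun c i =>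
      (PySem.List.pyRange (i+1) n 1).foldl
        (fun c j => pvSet2 c i j (max (PySem.List.pyGetD a i 0 - pvGet2 c (i+1) j)
            (PySem.List.pyGetD a j 0 - pvGet2 c i (j-1)))) c) c) := by
  intro k
  induction k with
  | zero =>
    intro p c hp0 hpn hk hTab
    rw [PySem.List.pyRange_neg_one_eq_nil (by omega)]
    have : p = -1 := by omega
    subst this; exact hTab
  | succ k ih =>
    intro p c hp0 hpn hk hTab
    have hplt : -1 < p := by omega
    rw [PySem.List.pyRange_neg_one_cons hplt]
    simp only [List.foldl_cons]
    apply ih (p-1) _ (by omega) (by omega) (by omega)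
    -- one inner pass over row p
    have hpre : pvTab a n p (p+1) c := by
      obtain ⟨hWf, hcell⟩ := hTab
      refine ⟨hWf, ?_⟩
      intro i' j' h0' hn' hle' hlt' hcase
      apply hcell i' j' h0' hn' hle' hlt'
      rcases hcase with h | h | ⟨h1, h2⟩
      · left; exact h
      · right; left; exact h
      · right; left; omega
    have hrow := pvInner a n p (by omega) (by omega) (n - (p+1)).toNat (p+1) c
      (by omega) (by omega) rfl hpre
    obtain ⟨hWf, hcell⟩ := hrow
    refine ⟨hWf, ?_⟩
    intro i' j' h0' hn' hle' hlt' hcase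
    apply hcell i' j' h0' hn' hle' hlt'
    rcases hcase with h | h | ⟨h1, h2⟩
    · by_cases hip : i' = p
      · right; right; exact ⟨hip, by omega⟩
      · left; omega
    · right; left; exact h
    · omega

theorem gemedynyulia_spec : Claim_equal_gemedynyulia := by
  intro a n _hdom hpre
  obtain ⟨hn1, hnlen⟩ := hpre
  have hB : gemedynyulia_alt a n = pvSolve a 0 (n-1) := by
    unfold gemedynyulia_alt
    have hOK0 : pvMemoOK a PySem.Dict.empty := by
      intro p v hpv
      rw [PySem.Dict.get?_empty] at hpv
      cases hpv
    exact (pvMemo_correct a (n - 1 - 0).toNat 0 (n-1) PySem.Dict.empty (by omega) hOK0).1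
  have hA : gemedynyulia a n = pvSolve a 0 (n-1) := by
    simp only [gemedynyulia]
    have hWf0 : pvWf n ((PySem.List.pyRange 0 n 1).map
        (fun _i => (PySem.List.pyRange 0 n 1).map (fun _j => (-1 : Int)))) := by
      constructor
      · simp [PySem.List.length_pyRange_one]
      · intro r hr
        rw [List.mem_map] at hr
        obtain ⟨x, _, rfl⟩ := hr
        simp [PySem.List.length_pyRange_one]
    have hd := pvDiag a n (n - 0).toNat 0 _ (by omega) (by omega) rfl hWf0
      (fun i h0 h1 => absurd h1 (by omega))
    have hTab1 : pvTab a n (n-2) (n-2) ((PySem.List.pyRange 0 n 1).foldl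
        (fun c i => pvSet2 c i i (PySem.List.pyGetD a i 0))
        ((PySem.List.pyRange 0 n 1).map
          (fun _i => (PySem.List.pyRange 0 n 1).map (fun _j => (-1 : Int))))) := by
      refine ⟨hd.1, ?_⟩
      intro i' j' h0' hn' hle' hlt' hcase
      have e : i' = j' := by
        rcases hcase with h | h | ⟨h1, h2⟩ <;> omega
      subst e
      rw [pvSolve_diag]
      exact hd.2 i' h0' hn'
    have hout := pvOuter a n (n-1).toNat (n-2) _ (by omega) (by omega) (by omega) hTab1
    exact hout.2 0 (n-1) (by omega) (by omega) (by omega) (by omega) (by left; omega)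
  unfold Spec_gemedynyulia
  rw [hA, hB]
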